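-- pv_equiv track=rewrite | github.com/Jarabi/fundamental-coding-interview-prep | 02-simple-looping-with-python/10-triplet_character_reverse.py | reversed_triple_chars
-- ===== SOURCE A (Python) =====
-- def reversed_triple_chars(s: str) -> str:
--     triplets = ""
--
--     for i in range(0, len(s), 3):
--         # Get subset of 3 characters
--         subset = s[i:i + 3]
--
--         if len(subset) == 3:
--             # Place reversed string in original position
--             triplets += subset[::-1]
--         else:
--             # Subset shorter than 3 characters. Leave as is
--             triplets += subset
--
--     return triplets
-- ===== SOURCE B (Python) =====
-- def reversed_triple_chars(s: str) -> str:
--     out = list(s)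
--     for g in range(0, len(s) - 2, 3):
--         out[g], out[g + 2] = out[g + 2], out[g]
--     return ''.join(out)
-- ===== Notes on version B (the rewrite author's own statement) =====
-- stated objective: simpler
-- what changed: B swaps the endpoints of each full triplet in place on a char list (the middle char stays), dropping A's slice-reverse, length branch and repeated string concatenation.
import Mathlib
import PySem

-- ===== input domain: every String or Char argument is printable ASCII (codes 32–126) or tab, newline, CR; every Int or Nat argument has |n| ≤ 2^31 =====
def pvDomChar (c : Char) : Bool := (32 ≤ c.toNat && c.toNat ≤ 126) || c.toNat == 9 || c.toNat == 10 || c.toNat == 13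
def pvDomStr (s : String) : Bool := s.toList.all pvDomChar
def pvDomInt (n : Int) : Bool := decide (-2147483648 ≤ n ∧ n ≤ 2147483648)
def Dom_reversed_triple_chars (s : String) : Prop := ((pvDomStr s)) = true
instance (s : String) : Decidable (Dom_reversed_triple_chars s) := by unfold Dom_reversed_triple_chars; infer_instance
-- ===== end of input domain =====

-- B swaps the endpoints of each full triplet in place on a char list, dropping A's
-- slice-reverse, length branch and string concatenation (objective: simpler).

-- ===== PORT A =====
-- loop body of A: subset = s[i:i+3]; if len == 3 append subset[::-1] else append subset
def pvStepA (cs : List Char) (acc : List Char) (i : Int) : List Char :=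
  let subset := PySem.List.slice cs (some i) (some (i + 3))
  if subset.length == 3 then
    acc ++ ((PySem.List.slice? subset none none (-1)).getD subset)
  else
    acc ++ subset

def reversed_triple_chars (s : String) : String :=
  String.ofList ((PySem.List.pyRange 0 (s.toList.length : Int) 3).foldl (pvStepA s.toList) [])

-- ===== PORT B =====
-- loop body of B: out[g], out[g+2] = out[g+2], out[g]
def pvSwapB (o : List Char) (g : Int) : List Char :=
  let x := PySem.List.pyGetD o g ' '
  let y := PySem.List.pyGetD o (g + 2) ' '
  PySem.List.pySetD (PySem.List.pySetD o g y) (g + 2) x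

def reversed_triple_chars_alt (s : String) : String :=
  String.ofList ((PySem.List.pyRange 0 ((s.toList.length : Int) - 2) 3).foldl pvSwapB s.toList)

-- ===== PRECONDITION & SPEC =====
def Spec_reversed_triple_chars (s : String) (out : String) : Prop := out = reversed_triple_chars_alt s
instance (s : String) (out : String) : Decidable (Spec_reversed_triple_chars s out) := by unfold Spec_reversed_triple_chars; infer_instance

-- ===== CLAIM (what is proved, stated in full; the proofs are below) =====
def Claim_equal_reversed_triple_chars : Prop := ∀ (s : String), Dom_reversed_triple_chars s → Spec_reversed_triple_chars s (reversed_triple_chars s)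

-- ===== LEMMAS AND PROOFS =====

-- common specification: reverse each consecutive full triplet
def pvChunkRev : List Char → List Char
  | a :: b :: c :: rest => c :: b :: a :: pvChunkRev rest
  | l => l

theorem pvR3_nil (b : Int) (h : b ≤ 0) : PySem.List.pyRange 0 b 3 = [] := by
  rw [PySem.List.pyRange_of_pos 0 b (by norm_num)]
  simp [show ¬ (0 < b) by omega]

theorem pvR3_cons (b : Int) (h : 0 < b) :
    PySem.List.pyRange 0 b 3 = 0 :: (PySem.List.pyRange 0 (b - 3) 3).map (· + 3) := by
  rw [PySem.List.pyRange_of_pos 0 b (by norm_num),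
      PySem.List.pyRange_of_pos 0 (b - 3) (by norm_num)]
  simp only [show (0 : Int) < b from h, if_pos]
  by_cases h3 : 0 < b - 3
  · have hc : ((b - 0 + 3 - 1) / 3).toNat = ((b - 3 - 0 + 3 - 1) / 3).toNat + 1 := by omega
    rw [hc, if_pos h3, List.range_succ_eq_map]
    simp [List.map_map, Function.comp]
    intro k _
    ring
  · have hc : ((b - 0 + 3 - 1) / 3).toNat = 1 := by omega
    rw [hc, if_neg h3]
    simp

theorem pvStepA_shift (a b c : Char) (rest : List Char) (acc : List Char) (j : Int)
    (hj : 0 ≤ j) :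
    pvStepA (a :: b :: c :: rest) acc (j + 3) = pvStepA rest acc j := by
  have hs : PySem.List.slice (a :: b :: c :: rest) (some (j + 3)) (some (j + 3 + 3))
      = PySem.List.slice rest (some j) (some (j + 3)) := by
    rw [PySem.List.slice_toNat _ (by omega) (by omega),
        PySem.List.slice_toNat _ (by omega) (by omega),
        show (j + 3 + 3).toNat - (j + 3).toNat = 3 by omega,
        show (j + 3).toNat - j.toNat = 3 by omega,
        show (j + 3).toNat = j.toNat + 3 by omega]
    rfl
  simp only [pvStepA, hs]

theorem pvFoldA_shift (a b c : Char) (rest : List Char) :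
    ∀ (l : List Int), (∀ j ∈ l, 0 ≤ j) → ∀ acc,
      (l.map (· + 3)).foldl (pvStepA (a :: b :: c :: rest)) acc = l.foldl (pvStepA rest) acc := by
  intro l
  induction l with
  | nil => intro _ acc; rfl
  | cons j t ih =>
    intro hmem acc
    simp only [List.map_cons, List.foldl_cons]
    rw [pvStepA_shift a b c rest acc j (hmem j (by simp))]
    exact ih (fun x hx => hmem x (by simp [hx])) _

theorem pvA_eq : ∀ (cs : List Char) (acc : List Char),
    (PySem.List.pyRange 0 (cs.length : Int) 3).foldl (pvStepA cs) acc = acc ++ pvChunkRev cs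
  | [], acc => by simp [pvR3_nil 0 (by norm_num), pvChunkRev]
  | [a], acc => by
      rw [show ((([a] : List Char).length : Int)) = 1 by simp, pvR3_cons 1 (by norm_num),
          pvR3_nil (1 - 3) (by norm_num)]
      simp only [List.map_nil, List.foldl_cons, List.foldl_nil, pvStepA]
      rw [PySem.List.slice_toNat _ (by norm_num) (by norm_num)]
      simp [pvChunkRev]
  | [a, b], acc => by
      rw [show ((([a, b] : List Char).length : Int)) = 2 by simp, pvR3_cons 2 (by norm_num),
          pvR3_nil (2 - 3) (by norm_num)]
      simp only [List.map_nil, List.foldl_cons, List.foldl_nil, pvStepA]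
      rw [PySem.List.slice_toNat _ (by norm_num) (by norm_num)]
      simp [pvChunkRev]
  | a :: b :: c :: rest, acc => by
      have hlen : (((a :: b :: c :: rest).length : Int)) = (rest.length : Int) + 3 := by
        simp; ring
      rw [hlen, pvR3_cons ((rest.length : Int) + 3) (by positivity),
          show (rest.length : Int) + 3 - 3 = (rest.length : Int) by ring]
      simp only [List.foldl_cons]
      have hstep0 : pvStepA (a :: b :: c :: rest) acc 0 = acc ++ [c, b, a] := by
        unfold pvStepA
        rw [PySem.List.slice_toNat _ (by norm_num) (by norm_num)]
        norm_num
        rw [show Int.toNat 3 = 3 from rfl,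
            show List.take 3 (a :: b :: c :: rest) = [a, b, c] from rfl]
        simp [PySem.List.slice?_none_none_neg_one]
      rw [hstep0,
          pvFoldA_shift a b c rest _
            (fun j hj => by
              have := (PySem.List.mem_pyRange_iff_of_pos (by norm_num) j).mp hj
              omega)
            (acc ++ [c, b, a]),
          pvA_eq rest (acc ++ [c, b, a])]
      simp [pvChunkRev]

theorem pvSwapB_shift (x y z : Char) (r : List Char) (j : Int) (hj : 0 ≤ j) :
    pvSwapB (x :: y :: z :: r) (j + 3) = x :: y :: z :: pvSwapB r j := by
  have hget : ∀ (k : Int), 0 ≤ k → ∀ (o : List Char) (d : Char),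
      PySem.List.pyGetD (x :: y :: z :: o) (k + 3) d = PySem.List.pyGetD o k d := by
    intro k hk o d
    simp only [PySem.List.pyGetD, PySem.List.pyGet?_of_nonneg _ (show (0 : Int) ≤ k + 3 by omega),
               PySem.List.pyGet?_of_nonneg _ hk,
               show (k + 3).toNat = k.toNat + 3 by omega]
    rfl
  have hset : ∀ (k : Int), 0 ≤ k → ∀ (o : List Char) (v : Char),
      PySem.List.pySetD (x :: y :: z :: o) (k + 3) v = x :: y :: z :: PySem.List.pySetD o k v := by
    intro k hk o v
    rw [PySem.List.pySetD_of_nonneg _ _ (show (0 : Int) ≤ k + 3 by omega),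
        PySem.List.pySetD_of_nonneg _ _ hk,
        show (k + 3).toNat = k.toNat + 3 by omega]
    rfl
  simp only [pvSwapB]
  rw [hget j hj, show j + 3 + 2 = (j + 2) + 3 by ring, hget (j + 2) (by omega),
      hset j hj, hset (j + 2) (by omega)]

theorem pvFoldB_shift (x y z : Char) :
    ∀ (l : List Int), (∀ j ∈ l, 0 ≤ j) → ∀ (r : List Char),
      (l.map (· + 3)).foldl pvSwapB (x :: y :: z :: r) = x :: y :: z :: l.foldl pvSwapB r := by
  intro l
  induction l with
  | nil => intro _ r; rfl
  | cons j t ih =>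
    intro hmem r
    simp only [List.map_cons, List.foldl_cons]
    rw [pvSwapB_shift x y z r j (hmem j (by simp))]
    exact ih (fun v hv => hmem v (by simp [hv])) _

theorem pvB_eq : ∀ (cs : List Char),
    (PySem.List.pyRange 0 ((cs.length : Int) - 2) 3).foldl pvSwapB cs = pvChunkRev cs
  | [] => by
      rw [show ((([] : List Char).length : Int)) - 2 = -2 by simp, pvR3_nil (-2) (by norm_num)]
      rfl
  | [a] => by
      rw [show ((([a] : List Char).length : Int)) - 2 = -1 by simp, pvR3_nil (-1) (by norm_num)]
      rfl
  | [a, b] => by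
      rw [show ((([a, b] : List Char).length : Int)) - 2 = 0 by simp, pvR3_nil 0 (by norm_num)]
      rfl
  | a :: b :: c :: rest => by
      have hlen : (((a :: b :: c :: rest).length : Int)) - 2 = (rest.length : Int) + 1 := by
        simp; ring
      rw [hlen, pvR3_cons ((rest.length : Int) + 1) (by positivity),
          show (rest.length : Int) + 1 - 3 = (rest.length : Int) - 2 by ring]
      simp only [List.foldl_cons]
      have hswap0 : pvSwapB (a :: b :: c :: rest) 0 = c :: b :: a :: rest := by
        simp only [pvSwapB, PySem.List.pyGetD,
                   PySem.List.pyGet?_of_nonneg _ (show (0 : Int) ≤ 0 by norm_num),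
                   PySem.List.pyGet?_of_nonneg _ (show (0 : Int) ≤ 0 + 2 by norm_num)]
        rw [PySem.List.pySetD_of_nonneg _ _ (show (0 : Int) ≤ 0 by norm_num),
            PySem.List.pySetD_of_nonneg _ _ (show (0 : Int) ≤ 0 + 2 by norm_num)]
        rfl
      rw [hswap0,
          pvFoldB_shift c b a _
            (fun j hj => by
              have := (PySem.List.mem_pyRange_iff_of_pos (by norm_num) j).mp hj
              omega)
            rest,
          pvB_eq rest]
      simp [pvChunkRev]

-- ===== VERDICT (by name: the statement is the Claim_ definition above) =====
theorem reversed_triple_chars_spec : Claim_equal_reversed_triple_chars := by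
  intro s _
  unfold Spec_reversed_triple_chars reversed_triple_chars reversed_triple_chars_alt
  rw [pvA_eq, pvB_eq]
  simp
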